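-- pv_equiv track=rewrite | github.com/bobbykuzma/fhirbug | fhirbug/recon/error_oracles.py | detect_stack_trace_leak
-- ===== SOURCE A (Python) =====
-- def detect_stack_trace_leak(errors: list[str]) -> bool:
--     """Check if any error looks like a leaked stack trace."""
--     trace_indicators = [
--         "Traceback (most recent call",
--         "at java.",
--         "at org.springframework.",
--         "at org.eclipse.",
--         "at com.sun.",
--         "at jakarta.",
--         "at gov.cms.",
--         "at uk.org.",
--         "Cannot invoke",
--         "NullPointerException",
--         "System.Exception",
--         "StackTraceElement",
--         "File \"/",
--     ]
--     return any(ind in err for err in errors for ind in trace_indicators)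
-- ===== SOURCE B (Python) =====
-- _TRACE_INDICATORS = [
--     "Traceback (most recent call",
--     "at java.",
--     "at org.springframework.",
--     "at org.eclipse.",
--     "at com.sun.",
--     "at jakarta.",
--     "at gov.cms.",
--     "at uk.org.",
--     "Cannot invoke",
--     "NullPointerException",
--     "System.Exception",
--     "StackTraceElement",
--     "File \"/",
-- ]
--
--
-- def detect_stack_trace_leak(errors: "list[str]") -> bool:
--     """Check if any error looks like a leaked stack trace."""
--     for err in errors:
--         pos = 0
--         while pos < len(err):
--             for ind in _TRACE_INDICATORS:
--                 if err.startswith(ind, pos):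
--                     return True
--             pos += 1
--     return False
-- ===== Notes on version B (the rewrite author's own statement) =====
-- stated objective: alternative
-- what changed: Replaces 13 independent substring searches per error with one left-to-right scan per error that tests all indicators as prefixes at each position (a naive multi-pattern matcher), with early return on the first hit.
import Mathlib
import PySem

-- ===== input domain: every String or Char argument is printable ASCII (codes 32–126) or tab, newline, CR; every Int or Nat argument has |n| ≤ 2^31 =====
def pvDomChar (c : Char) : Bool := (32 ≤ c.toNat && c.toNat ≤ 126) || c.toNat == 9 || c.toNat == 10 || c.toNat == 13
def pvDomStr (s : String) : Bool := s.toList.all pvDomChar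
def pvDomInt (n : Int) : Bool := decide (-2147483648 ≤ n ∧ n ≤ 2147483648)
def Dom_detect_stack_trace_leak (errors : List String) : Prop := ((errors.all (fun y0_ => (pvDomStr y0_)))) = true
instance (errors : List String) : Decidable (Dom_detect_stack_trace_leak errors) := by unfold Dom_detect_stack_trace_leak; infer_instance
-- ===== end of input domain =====

-- B replaces A's 13 independent substring searches per error with one left-to-right scan
-- testing every indicator as a prefix at each position (alternative decomposition, same cost class).

-- ===== PORT A =====
def traceIndicators : List String := [
  "Traceback (most recent call",
  "at java.",
  "at org.springframework.",
  "at org.eclipse.",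
  "at com.sun.",
  "at jakarta.",
  "at gov.cms.",
  "at uk.org.",
  "Cannot invoke",
  "NullPointerException",
  "System.Exception",
  "StackTraceElement",
  "File \"/"]

def detect_stack_trace_leak (errors : List String) : Bool :=
  errors.any (fun err => traceIndicators.any (fun ind => PySem.Str.isIn ind err))

-- ===== PORT B =====
-- the inner while-loop of Source B: walk the suffixes of the string, testing each indicator as a prefix
def scanTrace (cs : List Char) : Bool :=
  match cs with
  | [] => false
  | c :: rest =>
      traceIndicators.any (fun ind => ind.toList.isPrefixOf (c :: rest)) || scanTrace rest

def detect_stack_trace_leak_alt (errors : List String) : Bool :=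
  errors.any (fun err => scanTrace err.toList)

-- ===== PRECONDITION & SPEC =====
def Spec_detect_stack_trace_leak (errors : List String) (out : Bool) : Prop := out = detect_stack_trace_leak_alt errors
instance (errors : List String) (out : Bool) : Decidable (Spec_detect_stack_trace_leak errors out) := by unfold Spec_detect_stack_trace_leak; infer_instance

-- ===== CLAIM (what is proved, stated in full; the proofs are below) =====
def Claim_equal_detect_stack_trace_leak : Prop := ∀ (errors : List String), Dom_detect_stack_trace_leak errors → Spec_detect_stack_trace_leak errors (detect_stack_trace_leak errors)

-- ===== LEMMAS AND PROOFS =====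

-- per string: the position scan finds exactly the indicators occurring as infixes
theorem scanTrace_eq (s : List Char) :
    scanTrace s = traceIndicators.any (fun ind => PySem.Chars.isIn ind.toList s) := by
  induction s with
  | nil => decide
  | cons c rest ih =>
      rw [scanTrace, ih, Bool.eq_iff_iff]
      simp only [Bool.or_eq_true, List.any_eq_true, List.isPrefixOf_iff_prefix,
        PySem.Chars.isIn_iff_infix, List.infix_cons_iff]
      constructor
      · rintro (⟨x, hx, h⟩ | ⟨x, hx, h⟩)
        exacts [⟨x, hx, Or.inl h⟩, ⟨x, hx, Or.inr h⟩]
      · rintro ⟨x, hx, h | h⟩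
        exacts [Or.inl ⟨x, hx, h⟩, Or.inr ⟨x, hx, h⟩]

-- ===== VERDICT (by name: the statement is the Claim_ definition above) =====
theorem detect_stack_trace_leak_spec : Claim_equal_detect_stack_trace_leak := by
  intro errors _
  unfold Spec_detect_stack_trace_leak detect_stack_trace_leak detect_stack_trace_leak_alt
  simp only [scanTrace_eq, PySem.Str.isIn_eq]
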